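-- pv_equiv track=rewrite | github.com/zizouvb/codewars | 6kyu/simple_prime_streaming.py | solve
-- ===== SOURCE A (Python) =====
-- import math
--
-- def solve(a, b):
--     primes = ["2"]
--     for i in range(3,50000):
--         for j in range(2, math.ceil(math.sqrt(i))+1):
--             if not i % j:
--                 break
--         else:
--             primes.append(str(i))
--     return "".join(primes)[a:a+b]
-- ===== SOURCE B (Python) =====
-- def solve(a, b):
--     n = 50000
--     sieve = bytearray([1]) * n
--     sieve[0:2] = b"\x00\x00"          # 0 and 1 are not prime
--     i = 2
--     while i * i < n:
--         if sieve[i]: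
--             sieve[i*i::i] = bytes(len(range(i*i, n, i)))
--         i += 1
--     digits = "".join(str(k) for k in range(n) if sieve[k])
--     return digits[a:a + b]
-- ===== Notes on version B (the rewrite author's own statement) =====
-- stated objective: faster
-- what changed: Replaces per-number trial division (sqrt bound) with a Sieve of Eratosthenes over a bytearray using slice assignment, then joins the surviving indices once.
import Mathlib
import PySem

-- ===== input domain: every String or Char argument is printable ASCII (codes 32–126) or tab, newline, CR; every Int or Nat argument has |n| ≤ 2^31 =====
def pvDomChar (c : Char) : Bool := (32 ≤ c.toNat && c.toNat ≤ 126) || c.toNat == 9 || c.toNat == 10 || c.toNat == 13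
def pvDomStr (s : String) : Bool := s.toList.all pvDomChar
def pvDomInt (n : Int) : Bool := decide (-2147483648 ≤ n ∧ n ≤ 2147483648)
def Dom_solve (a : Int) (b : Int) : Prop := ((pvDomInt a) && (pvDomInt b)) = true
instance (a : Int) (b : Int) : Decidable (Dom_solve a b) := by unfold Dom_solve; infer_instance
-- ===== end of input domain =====

-- B replaces A's per-number trial division with a Sieve of Eratosthenes and one join pass (faster).
-- Both ports work on the List Char side (PySem.Chars) and convert to String once at the end,
-- exactly as the PySem string wrappers do.


-- ===== PORT A =====
-- hand port of math.ceil(math.sqrt(i)): for the 0 ≤ i < 50000 reached here the C double sqrt is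
-- exact enough that ceil(sqrt(i)) = isqrt(i) if i is a perfect square, else isqrt(i)+1;
-- isqrt is computed by a structural binary bit scan (isqrtGo 8 n 0 = ⌊√n⌋ for every n < 65536)
def isqrtGo : Nat → Nat → Nat → Nat
  | 0, _, s => s
  | f + 1, n, s => if (s + 2 ^ f) * (s + 2 ^ f) ≤ n then isqrtGo f n (s + 2 ^ f) else isqrtGo f n s

def ceilSqrt (i : Int) : Int :=
  let s := isqrtGo 8 i.toNat 0
  if s * s = i.toNat then (s : Int) else (s : Int) + 1

-- the inner loop: breaks (true) iff some j in range(2, ceil(sqrt(i))+1) divides i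
def hasDivisor (i : Int) : Bool :=
  (PySem.List.pyRange 2 (ceilSqrt i + 1) 1).any (fun j => PySem.Int.mod i j == 0)

-- the for/else loop: str(i) is appended iff the inner loop did not break
def solvePrimes : List (List Char) :=
  (PySem.List.pyRange 3 50000 1).foldl
    (fun primes i =>
      if hasDivisor i
      then primes
      else primes ++ [PySem.Int.toChars i])
    [['2']]

def solve (a : Int) (b : Int) : String :=
  String.ofList (PySem.Chars.slice (PySem.Chars.join [] solvePrimes) (some a) (some (a + b)))

-- ===== PORT B =====
-- hand port of the slice assignment sieve[i*i::i] = bytes(...): writes 0 at every position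
-- k = i*i, i*i+i, … in one index-aware pass (exact for step i > 0)
def sieveClear (sieve : List Nat) (i : Nat) : List Nat :=
  sieve.mapIdx (fun k v => if i * i ≤ k ∧ (k - i * i) % i = 0 then 0 else v)

-- the while loop as structural recursion on a fuel bound (fuel 50000 > all iterations; it only
-- makes the recursion structural, the loop itself still exits when i*i >= 50000);
-- indices and byte values are nonnegative Python ints, carried as Nat (exact here)
def sieveGo : Nat → List Nat → Nat → List Nat
  | 0, sieve, _ => sieve
  | fuel + 1, sieve, i =>
    if i * i < 50000 then
      sieveGo fuel (if sieve.getD i 0 ≠ 0 then sieveClear sieve i else sieve) (i + 1)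
    else sieve

def sieveLoop (sieve : List Nat) (i : Nat) : List Nat := sieveGo 50000 sieve i

-- bytearray([1]) * n with sieve[0:2] = b"\x00\x00"
def sieveInit : List Nat := ((List.replicate 50000 (1 : Nat)).set 0 0).set 1 0

def solveDigits : List Char :=
  PySem.Chars.join []
    (((PySem.List.pyRange 0 50000 1).filter
        (fun k => decide (PySem.List.pyGetD (sieveLoop sieveInit 2) k 0 ≠ 0))).map
      (fun k => PySem.Int.toChars k))

def solve_alt (a : Int) (b : Int) : String :=
  String.ofList (PySem.Chars.slice solveDigits (some a) (some (a + b)))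

-- ===== PRECONDITION & SPEC =====
def Spec_solve (a : Int) (b : Int) (out : String) : Prop := out = solve_alt a b
instance (a : Int) (b : Int) (out : String) : Decidable (Spec_solve a b out) := by unfold Spec_solve; infer_instance

-- ===== CLAIM (what is proved, stated in full; the proofs are below) =====
def Claim_equal_solve : Prop := ∀ (a : Int) (b : Int), Dom_solve a b → Spec_solve a b (solve a b)

-- ===== LEMMAS AND PROOFS =====

-- the canonical value both prime generators are proved equal to
def primePieces : List (List Char) :=
  ((PySem.List.pyRange 0 50000 1).filter (fun i => decide (Nat.Prime i.toNat))).map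
    (fun i => PySem.Int.toChars i)

-- ---- A side ----

theorem isqrtGo_spec : ∀ (f n s : Nat), s * s ≤ n → n < (s + 2 ^ f) * (s + 2 ^ f) →
    (isqrtGo f n s) * (isqrtGo f n s) ≤ n ∧ n < (isqrtGo f n s + 1) * (isqrtGo f n s + 1) := by
  intro f
  induction f with
  | zero => intro n s h1 h2; simpa using ⟨h1, by simpa using h2⟩
  | succ f ih =>
    intro n s h1 h2
    simp only [isqrtGo]
    split_ifs with h
    · exact ih n (s + 2 ^ f) h (by
        have : s + 2 ^ f + 2 ^ f = s + 2 ^ (f + 1) := by ring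
        rw [this]; exact h2)
    · exact ih n s h1 (by omega)

theorem hasDivisor_iff (n : Nat) (h3 : 3 ≤ n) (hn : n < 50000) :
    hasDivisor (n : Int) = true ↔ ¬ Nat.Prime n := by
  have htn : ((n : Int)).toNat = n := Int.toNat_natCast n
  obtain ⟨hs1, hs2⟩ := isqrtGo_spec 8 n 0 (by simp) (by norm_num; omega)
  set s := isqrtGo 8 n 0 with hsdef
  have hcs : ceilSqrt (n : Int) = ((if s * s = n then s else s + 1 : Nat) : Int) := by
    unfold ceilSqrt
    rw [htn, ← hsdef]
    rcases eq_or_ne (s * s) n with h | h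
    · rw [if_pos h, if_pos h]
    · rw [if_neg h, if_neg h]; push_cast; ring
  set c : Nat := if s * s = n then s else s + 1 with hcdef
  have hsc : s ≤ c ∧ c ≤ s + 1 := by rw [hcdef]; split_ifs <;> omega
  unfold hasDivisor
  rw [hcs]
  constructor
  · intro h hp
    obtain ⟨j, hjm, hj⟩ := List.any_eq_true.mp h
    obtain ⟨hj2, hjc⟩ := PySem.List.mem_pyRange_one.mp hjm
    have hjd : j ∣ (n : Int) := (PySem.Int.mod_eq_zero_iff_dvd _ _).mp (by simpa using hj)
    set m := j.toNat with hmdef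
    have hjm' : j = (m : Int) := by omega
    have hmd : m ∣ n := by
      rw [hjm'] at hjd; exact_mod_cast hjd
    have hm2 : 2 ≤ m := by omega
    have hmc : m ≤ c := by omega
    rcases (hp.eq_one_or_self_of_dvd m hmd) with h1 | h1
    · omega
    · -- m = n, so n ≤ c ≤ s + 1 while s * s ≤ n and 3 ≤ n
      have hn1 : n ≤ s + 1 := by omega
      have : (n - 1) * (n - 1) ≤ s * s := Nat.mul_le_mul (by omega) (by omega)
      nlinarith
  · intro hnp
    have hp : Nat.Prime n.minFac := Nat.minFac_prime (by omega)
    have hd : n.minFac ∣ n := Nat.minFac_dvd n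
    have hsq : n.minFac * n.minFac ≤ n := by
      have := Nat.minFac_sq_le_self (by omega) hnp
      nlinarith [this, sq_nonneg n.minFac]
    have hps : n.minFac ≤ s := by
      by_contra hlt
      have : (s + 1) * (s + 1) ≤ n.minFac * n.minFac := Nat.mul_le_mul (by omega) (by omega)
      omega
    apply List.any_eq_true.mpr
    refine ⟨(n.minFac : Int), PySem.List.mem_pyRange_one.mpr ⟨by exact_mod_cast hp.two_le, by
      have : n.minFac ≤ c := le_trans hps hsc.1
      omega⟩, ?_⟩
    simp only [beq_iff_eq]
    exact (PySem.Int.mod_eq_zero_iff_dvd _ _).mpr (by exact_mod_cast hd)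

theorem solvePrimes_eq :
    solvePrimes =
      [['2']] ++
        ((PySem.List.pyRange 3 50000 1).filter (fun i => !hasDivisor i)).map
          (fun i => PySem.Int.toChars i) := by
  unfold solvePrimes
  have h : ∀ (acc : List (List Char)) (i : Int),
      (if hasDivisor i then acc else acc ++ [PySem.Int.toChars i]) =
        (if !hasDivisor i then acc ++ [PySem.Int.toChars i] else acc) := by
    intro acc i; cases hasDivisor i <;> simp
  simp only [h]
  exact PySem.List.foldl_append_if _ _ _ _

theorem A_eq_pieces : solvePrimes = primePieces := by
  rw [solvePrimes_eq]
  unfold primePieces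
  rw [PySem.List.pyRange_one_append 0 3 50000 (by norm_num) (by norm_num),
      List.filter_append, List.map_append]
  have hhead : ((PySem.List.pyRange 0 3 1).filter (fun i => decide (Nat.Prime i.toNat))).map
      (fun i => PySem.Int.toChars i) = [['2']] := by decide
  rw [hhead]
  have htail : (PySem.List.pyRange 3 50000 1).filter (fun i => !hasDivisor i) =
      (PySem.List.pyRange 3 50000 1).filter (fun i => decide (Nat.Prime i.toNat)) := by
    apply List.filter_congr
    intro i hi
    obtain ⟨h3, h5⟩ := PySem.List.mem_pyRange_one.mp hi
    have hi0 : (0 : Int) ≤ i := by omega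
    have h3n : 3 ≤ i.toNat := by omega
    have h5n : i.toNat < 50000 := by omega
    have hin : i = ((i.toNat : Nat) : Int) := by omega
    cases hh : hasDivisor i with
    | true =>
      have : ¬ Nat.Prime i.toNat := (hasDivisor_iff i.toNat h3n h5n).mp (by rwa [← hin])
      simp [this]
    | false =>
      have : Nat.Prime i.toNat := by
        by_contra hnp
        have := (hasDivisor_iff i.toNat h3n h5n).mpr hnp
        rw [← hin] at this
        simp [hh] at this
      simp [this]
  rw [htail]

-- ---- B side ----

-- the invariant predicate of the sieve loop: cell k still nonzero before processing i
def Good (i k : Nat) : Prop := 2 ≤ k ∧ ∀ p, p < i → Nat.Prime p → p ∣ k → k < p * p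

theorem good_self (i : Nat) (h2 : 2 ≤ i) : Good i i ↔ Nat.Prime i := by
  constructor
  · rintro ⟨-, hg⟩
    by_contra hnp
    have hp : Nat.Prime i.minFac := Nat.minFac_prime (by omega)
    have hd : i.minFac ∣ i := Nat.minFac_dvd i
    have hsq : i.minFac * i.minFac ≤ i := by
      have := Nat.minFac_sq_le_self (by omega) hnp
      nlinarith [this]
    have hlt : i.minFac < i := by nlinarith [hp.two_le]
    exact absurd (hg _ hlt hp hd) (by omega)
  · intro hp
    refine ⟨hp.two_le, fun p hlt hpp hdvd => ?_⟩
    rcases hp.eq_one_or_self_of_dvd p hdvd with h | h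
    · exact absurd h (by have := hpp.two_le; omega)
    · omega

theorem good_final (i k : Nat) (hi : 50000 ≤ i * i) (hk : k < 50000) :
    Good i k ↔ Nat.Prime k := by
  constructor
  · rintro ⟨h2, hg⟩
    by_contra hnp
    have hp : Nat.Prime k.minFac := Nat.minFac_prime (by omega)
    have hd : k.minFac ∣ k := Nat.minFac_dvd k
    have hsq : k.minFac * k.minFac ≤ k := by
      have := Nat.minFac_sq_le_self (by omega) hnp
      nlinarith [this]
    have hlt : k.minFac < i := by
      have : k.minFac * k.minFac < i * i := by omega
      exact Nat.mul_self_lt_mul_self_iff.mp this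
    exact absurd (hg _ hlt hp hd) (by omega)
  · intro hp
    refine ⟨hp.two_le, fun p hlt hpp hdvd => ?_⟩
    rcases hp.eq_one_or_self_of_dvd p hdvd with h | h
    · exact absurd h (by have := hpp.two_le; omega)
    · subst h; nlinarith [hp.two_le]

theorem sieveClear_length (s : List Nat) (i : Nat) : (sieveClear s i).length = s.length := by
  simp [sieveClear]

theorem sieveClear_getD (s : List Nat) (i k : Nat) (hk : k < s.length) :
    (sieveClear s i).getD k 0 =
      if i * i ≤ k ∧ (k - i * i) % i = 0 then 0 else s.getD k 0 := by
  have hk' : k < (sieveClear s i).length := by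
    simpa [sieveClear_length] using hk
  rw [List.getD_eq_getElem _ _ hk', List.getD_eq_getElem _ _ hk]
  simp [sieveClear, List.getElem_mapIdx]

theorem clear_cond (i k : Nat) (_hi : 1 ≤ i) :
    (i * i ≤ k ∧ (k - i * i) % i = 0) ↔ (i * i ≤ k ∧ i ∣ k) := by
  constructor
  · rintro ⟨hle, hmod⟩
    refine ⟨hle, ?_⟩
    have h1 : i ∣ (k - i * i) := Nat.dvd_iff_mod_eq_zero.mpr hmod
    have h2 : i ∣ i * i := Dvd.intro i rfl
    have := Nat.dvd_add h1 h2
    rwa [Nat.sub_add_cancel hle] at this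
  · rintro ⟨hle, hdvd⟩
    refine ⟨hle, Nat.dvd_iff_mod_eq_zero.mp (Nat.dvd_sub hdvd (Dvd.intro i rfl))⟩

theorem sieveGo_spec : ∀ (fuel i : Nat) (s : List Nat), 2 ≤ i → 224 ≤ fuel + i →
    s.length = 50000 → (∀ k, k < 50000 → (s.getD k 0 ≠ 0 ↔ Good i k)) →
    ∀ k, k < 50000 → ((sieveGo fuel s i).getD k 0 ≠ 0 ↔ Nat.Prime k) := by
  intro fuel
  induction fuel with
  | zero =>
    intro i s h2 h224 hlen hinv k hk
    have hii : 50000 ≤ i * i := by nlinarith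
    simpa [sieveGo] using (hinv k hk).trans (good_final i k hii hk)
  | succ fuel ih =>
    intro i s h2 h224 hlen hinv k hk
    by_cases hcond : i * i < 50000
    · rw [show sieveGo (fuel + 1) s i =
          sieveGo fuel (if s.getD i 0 ≠ 0 then sieveClear s i else s) (i + 1) from by
        simp only [sieveGo, if_pos hcond]]
      have hi50 : i < 50000 := by nlinarith
      have hprime : s.getD i 0 ≠ 0 ↔ Nat.Prime i := (hinv i hi50).trans (good_self i h2)
      have hstep : ∀ k', k' < 50000 →
          (((if s.getD i 0 ≠ 0 then sieveClear s i else s).getD k' 0) ≠ 0 ↔ Good (i + 1) k') := by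
        intro k' hk'
        by_cases hpt : s.getD i 0 ≠ 0
        · have hip : Nat.Prime i := hprime.mp hpt
          rw [if_pos hpt, sieveClear_getD s i k' (by omega)]
          split_ifs with hC
          · have hC' : i * i ≤ k' ∧ i ∣ k' := (clear_cond i k' (by omega)).mp hC
            simp only [ne_eq, not_true_eq_false, false_iff]
            rintro ⟨-, hg⟩
            exact absurd (hg i (by omega) hip hC'.2) (by omega)
          · have hC' : ¬ (i * i ≤ k' ∧ i ∣ k') := fun h => hC ((clear_cond i k' (by omega)).mpr h)
            rw [hinv k' hk']
            constructor
            · rintro ⟨hg2, hg⟩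
              refine ⟨hg2, fun p hlt hpp hdvd => ?_⟩
              rcases Nat.lt_succ_iff_lt_or_eq.mp hlt with h | h
              · exact hg p h hpp hdvd
              · subst h; by_contra hge; exact hC' ⟨by omega, hdvd⟩
            · rintro ⟨hg2, hg⟩
              exact ⟨hg2, fun p hlt hpp hdvd => hg p (by omega) hpp hdvd⟩
        · have hnp : ¬ Nat.Prime i := fun h => hpt (hprime.mpr h)
          rw [if_neg hpt, hinv k' hk']
          constructor
          · rintro ⟨hg2, hg⟩
            refine ⟨hg2, fun p hlt hpp hdvd => ?_⟩
            rcases Nat.lt_succ_iff_lt_or_eq.mp hlt with h | h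
            · exact hg p h hpp hdvd
            · subst h; exact absurd hpp hnp
          · rintro ⟨hg2, hg⟩
            exact ⟨hg2, fun p hlt hpp hdvd => hg p (by omega) hpp hdvd⟩
      have hlen' : (if s.getD i 0 ≠ 0 then sieveClear s i else s).length = 50000 := by
        split_ifs
        · rw [sieveClear_length, hlen]
        · exact hlen
      exact ih (i + 1) _ (by omega) (by omega) hlen' hstep k hk
    · rw [show sieveGo (fuel + 1) s i = s from by simp only [sieveGo, if_neg hcond]]
      exact (hinv k hk).trans (good_final i k (by omega) hk)

theorem sieveInit_length : sieveInit.length = 50000 := by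
  unfold sieveInit
  rw [List.length_set, List.length_set, List.length_replicate]

theorem sieveInit_eq : sieveInit = 0 :: 0 :: List.replicate 49998 1 := by
  unfold sieveInit
  rw [show (50000 : Nat) = 49998 + 1 + 1 by norm_num, List.replicate_succ, List.replicate_succ]
  rfl

theorem final_spec (k : Nat) (hk : k < 50000) :
    ((sieveLoop sieveInit 2).getD k 0 ≠ 0 ↔ Nat.Prime k) := by
  unfold sieveLoop
  refine sieveGo_spec 50000 2 sieveInit (by norm_num) (by norm_num) sieveInit_length ?_ k hk
  intro k' hk'
  rw [sieveInit_eq]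
  constructor
  · intro h
    rcases k' with _ | _ | m
    · simp only [List.getD_cons_zero, ne_eq, not_true_eq_false] at h
    · simp only [List.getD_cons_succ, List.getD_cons_zero, ne_eq, not_true_eq_false] at h
    · refine ⟨by omega, fun p hlt hpp _ => ?_⟩
      interval_cases p
      · exact absurd hpp Nat.not_prime_zero
      · exact absurd hpp Nat.not_prime_one
  · rintro ⟨h2, -⟩
    rcases k' with _ | _ | m
    · omega
    · omega
    · have hm : m < 49998 := by omega
      rw [List.getD_cons_succ, List.getD_cons_succ, List.getD_eq_getElem?_getD,
        List.getElem?_replicate, if_pos hm]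
      simp

theorem B_eq_pieces :
    ((PySem.List.pyRange 0 50000 1).filter
        (fun k => decide (PySem.List.pyGetD (sieveLoop sieveInit 2) k 0 ≠ 0))).map
      (fun k => PySem.Int.toChars k) = primePieces := by
  unfold primePieces
  have h : (PySem.List.pyRange 0 50000 1).filter
        (fun k => decide (PySem.List.pyGetD (sieveLoop sieveInit 2) k 0 ≠ 0)) =
      (PySem.List.pyRange 0 50000 1).filter (fun i => decide (Nat.Prime i.toNat)) := by
    apply List.filter_congr
    intro k hk
    obtain ⟨h0, h5⟩ := PySem.List.mem_pyRange_one.mp hk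
    rw [PySem.List.pyGetD_of_nonneg _ _ h0]
    have hk5 : k.toNat < 50000 := by omega
    simp only [decide_eq_decide]
    exact final_spec k.toNat hk5
  rw [h]

-- ---- combination ----

theorem digits_eq : PySem.Chars.join [] solvePrimes = solveDigits := by
  rw [A_eq_pieces]; unfold solveDigits; rw [B_eq_pieces]

-- ===== VERDICT (by name: the statement is the Claim_ definition above) =====
theorem solve_spec : Claim_equal_solve := by
  intro a b _
  unfold Spec_solve solve solve_alt
  rw [digits_eq]
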